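-- pv_equiv track=rewrite | github.com/SuhTozzi/Design-for-reuse | 1D_stock_path_design/tools.py | stock2path
-- ===== SOURCE A (Python) =====
-- def stock2path(path_by_tar):
--     pts, re_edges, non_re = [[0,0,0]], [], []
--     for stock in path_by_tar:
--         pt = pts[-1].copy()
--         if stock[0] > 0:
--             # (Direction_x1/y2/z3, Length, Reused:1/Undefined:2, target_num, order)
--             pt[stock[0]-1] += stock[1]
--         else:
--             pt[-stock[0]-1] -= stock[1]
--         pts.append(pt)
--         if stock[2] == 1:
--             re_edges.append(pts[-2:])
--         else:
--             non_re.append(pts[-2:])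
--     return pts, re_edges, non_re
-- ===== SOURCE B (Python) =====
-- def stock2path(path_by_tar):
--     # phase 1: build the full point table with a signed-axis update
--     pts = [[0, 0, 0]]
--     for stock in path_by_tar:
--         idx = abs(stock[0]) - 1
--         step = stock[1] if stock[0] > 0 else -stock[1]
--         pt = pts[-1].copy()
--         pt[idx] += step
--         pts.append(pt)
--     # phase 2: classify consecutive point pairs by the reuse flag
--     triples = list(zip(path_by_tar, pts, pts[1:]))
--     re_edges = [[a, b] for s, a, b in triples if s[2] == 1]
--     non_re = [[a, b] for s, a, b in triples if s[2] != 1]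
--     return pts, re_edges, non_re
-- ===== Notes on version B (the rewrite author's own statement) =====
-- stated objective: alternative
-- what changed: A's single interleaved loop (with a two-branch sign case and pts[-2:] slicing) is split into a build phase that computes the whole point table with one signed-axis update (index abs(d)-1, signed step) and a separate classify phase that zips the stocks with consecutive point pairs and filters by the reuse flag.
import Mathlib
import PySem

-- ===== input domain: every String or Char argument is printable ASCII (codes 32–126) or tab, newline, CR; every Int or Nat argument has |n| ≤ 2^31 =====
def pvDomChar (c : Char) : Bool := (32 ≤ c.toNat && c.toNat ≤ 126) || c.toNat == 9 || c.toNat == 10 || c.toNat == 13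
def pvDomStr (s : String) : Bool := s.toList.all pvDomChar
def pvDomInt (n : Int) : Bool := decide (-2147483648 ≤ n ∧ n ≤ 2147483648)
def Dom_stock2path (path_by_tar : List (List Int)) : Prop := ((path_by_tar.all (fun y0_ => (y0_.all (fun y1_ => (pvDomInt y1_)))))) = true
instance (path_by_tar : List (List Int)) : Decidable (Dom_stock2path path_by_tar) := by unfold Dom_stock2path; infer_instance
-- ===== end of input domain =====

-- B splits A's single interleaved loop into a build-the-point-table phase (one signed-axis
-- update) and a separate classify phase (zip with consecutive pairs, filter by reuse flag);
-- objective: alternative decomposition, same cost. Return-value equivalence only (A mutates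
-- nothing observable).


-- ===== PORT A =====
-- loop body of A: pt = pts[-1].copy(); branch on stock[0] > 0; append; classify pts[-2:]
def stepA (st : List (List Int) × List (List (List Int)) × List (List (List Int)))
    (stock : List Int) : List (List Int) × List (List (List Int)) × List (List (List Int)) :=
  let pts := st.1
  let pt := PySem.List.pyGetD pts (-1) []
  let s0 := PySem.List.pyGetD stock 0 0
  let pt' :=
    if s0 > 0 then
      PySem.List.pySetD pt (s0 - 1) (PySem.List.pyGetD pt (s0 - 1) 0 + PySem.List.pyGetD stock 1 0)
    else
      PySem.List.pySetD pt (-s0 - 1) (PySem.List.pyGetD pt (-s0 - 1) 0 - PySem.List.pyGetD stock 1 0)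
  let pts' := pts ++ [pt']
  if PySem.List.pyGetD stock 2 0 == 1 then
    (pts', st.2.1 ++ [PySem.List.slice pts' (some (-2)) none], st.2.2)
  else
    (pts', st.2.1, st.2.2 ++ [PySem.List.slice pts' (some (-2)) none])

def stock2path (path_by_tar : List (List Int)) : List (List Int) × List (List (List Int)) × List (List (List Int)) :=
  path_by_tar.foldl stepA ([[0, 0, 0]], [], [])

-- ===== PORT B =====
-- B's point update: idx = abs(stock[0]) - 1; step = ±stock[1]; pt[idx] += step
def nextPt (pt : List Int) (stock : List Int) : List Int :=
  let s0 := PySem.List.pyGetD stock 0 0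
  let idx : Int := (s0.natAbs : Int) - 1
  let step := if s0 > 0 then PySem.List.pyGetD stock 1 0 else -(PySem.List.pyGetD stock 1 0)
  PySem.List.pySetD pt idx (PySem.List.pyGetD pt idx 0 + step)

def stock2path_alt (path_by_tar : List (List Int)) : List (List Int) × List (List (List Int)) × List (List (List Int)) :=
  -- phase 1: build the point table
  let pts := path_by_tar.foldl (fun acc stock => acc ++ [nextPt (PySem.List.pyGetD acc (-1) []) stock]) [[0, 0, 0]]
  -- phase 2: zip(path_by_tar, pts, pts[1:]) and split by the reuse flag
  let triples := path_by_tar.zip (pts.zip (PySem.List.slice pts (some 1) none))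
  let re_edges := (triples.filter (fun t => PySem.List.pyGetD t.1 2 0 == 1)).map (fun t => [t.2.1, t.2.2])
  let non_re := (triples.filter (fun t => !(PySem.List.pyGetD t.1 2 0 == 1))).map (fun t => [t.2.1, t.2.2])
  (pts, re_edges, non_re)

-- ===== PRECONDITION & SPEC =====
-- Pre_ excludes exactly the inputs where Python A raises IndexError: a stock shorter than 3
-- entries, or a direction stock[0] outside [-3, 3] (the point has only 3 coordinates).
def Pre_stock2path (path_by_tar : List (List Int)) : Prop :=
  ∀ s ∈ path_by_tar, 3 ≤ s.length ∧ -3 ≤ PySem.List.pyGetD s 0 0 ∧ PySem.List.pyGetD s 0 0 ≤ 3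
instance (path_by_tar : List (List Int)) : Decidable (Pre_stock2path path_by_tar) := by unfold Pre_stock2path; infer_instance
def pvWitness_stock2path : List (List Int) := [[1, 4, 1, 0, 0], [-2, 3, 2, 0, 1]]

def Spec_stock2path (path_by_tar : List (List Int)) (out : List (List Int) × List (List (List Int)) × List (List (List Int))) : Prop := out = stock2path_alt path_by_tar
instance (path_by_tar : List (List Int)) (out : List (List Int) × List (List (List Int)) × List (List (List Int))) : Decidable (Spec_stock2path path_by_tar out) := by unfold Spec_stock2path; infer_instance

-- ===== CLAIM (what is proved, stated in full; the proofs are below) =====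
def Claim_equal_stock2path : Prop := ∀ (path_by_tar : List (List Int)), Dom_stock2path path_by_tar → Pre_stock2path path_by_tar → Spec_stock2path path_by_tar (stock2path path_by_tar)

-- ===== LEMMAS AND PROOFS =====

-- common recursion both ports unfold to
def go (p : List Int) : List (List Int) → List (List Int) × List (List (List Int)) × List (List (List Int))
  | [] => ([], [], [])
  | stock :: rest =>
    let p' := nextPt p stock
    if PySem.List.pyGetD stock 2 0 == 1 then
      (p' :: (go p' rest).1, [p, p'] :: (go p' rest).2.1, (go p' rest).2.2)
    else
      (p' :: (go p' rest).1, (go p' rest).2.1, [p, p'] :: (go p' rest).2.2)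

theorem go_cons (p stock : List Int) (rest : List (List Int)) :
    go p (stock :: rest) =
      if PySem.List.pyGetD stock 2 0 == 1 then
        (nextPt p stock :: (go (nextPt p stock) rest).1,
          [p, nextPt p stock] :: (go (nextPt p stock) rest).2.1, (go (nextPt p stock) rest).2.2)
      else
        (nextPt p stock :: (go (nextPt p stock) rest).1,
          (go (nextPt p stock) rest).2.1, [p, nextPt p stock] :: (go (nextPt p stock) rest).2.2) := rfl

theorem ptEq (pt stock : List Int) :
    (if PySem.List.pyGetD stock 0 0 > 0 then
      PySem.List.pySetD pt (PySem.List.pyGetD stock 0 0 - 1)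
        (PySem.List.pyGetD pt (PySem.List.pyGetD stock 0 0 - 1) 0 + PySem.List.pyGetD stock 1 0)
    else
      PySem.List.pySetD pt (-(PySem.List.pyGetD stock 0 0) - 1)
        (PySem.List.pyGetD pt (-(PySem.List.pyGetD stock 0 0) - 1) 0 - PySem.List.pyGetD stock 1 0))
    = nextPt pt stock := by
  unfold nextPt
  by_cases h : PySem.List.pyGetD stock 0 0 > 0
  · simp only [h, if_pos]
    rw [Int.natAbs_of_nonneg (le_of_lt h)]
  · simp only [h, if_false]
    rw [Int.ofNat_natAbs_of_nonpos (by omega)]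
    simp [sub_eq_add_neg]

theorem slice_pair (xs : List (List Int)) (p p' : List Int) :
    PySem.List.slice (xs ++ [p, p']) (some (-2)) none = [p, p'] := by
  rw [PySem.List.slice_from_neg_ofNat _ 2 (by omega)]
  simp

theorem stepA_eq (pts0 : List (List Int)) (p : List Int) (re0 non0 : List (List (List Int)))
    (stock : List Int) :
    stepA (pts0 ++ [p], re0, non0) stock =
      if PySem.List.pyGetD stock 2 0 == 1 then
        (pts0 ++ [p] ++ [nextPt p stock], re0 ++ [[p, nextPt p stock]], non0)
      else
        (pts0 ++ [p] ++ [nextPt p stock], re0, non0 ++ [[p, nextPt p stock]]) := by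
  have h1 : pts0 ++ [p] ++ [nextPt p stock] = pts0 ++ [p, nextPt p stock] := by simp
  by_cases h : PySem.List.pyGetD stock 2 0 == 1 <;>
    simp only [stepA, PySem.List.pyGetD_neg_one_append_singleton, ptEq, h1, slice_pair, h,
      Bool.false_eq_true, if_true, if_false]

theorem foldA (path : List (List Int)) : ∀ (pts0 : List (List Int)) (p : List Int)
    (re0 non0 : List (List (List Int))),
    path.foldl stepA (pts0 ++ [p], re0, non0) =
      (pts0 ++ [p] ++ (go p path).1, re0 ++ (go p path).2.1, non0 ++ (go p path).2.2) := by
  induction path with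
  | nil => intro pts0 p re0 non0; simp [go]
  | cons stock rest ih =>
    intro pts0 p re0 non0
    rw [List.foldl_cons, stepA_eq]
    by_cases h : PySem.List.pyGetD stock 2 0 == 1
    · rw [if_pos h, ih, go_cons, if_pos h]; simp
    · rw [if_neg h, ih, go_cons, if_neg h]; simp

theorem foldB (path : List (List Int)) : ∀ (pts0 : List (List Int)) (p : List Int),
    path.foldl (fun acc stock => acc ++ [nextPt (PySem.List.pyGetD acc (-1) []) stock]) (pts0 ++ [p]) =
      pts0 ++ [p] ++ (go p path).1 := by
  induction path with
  | nil => intro pts0 p; simp [go]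
  | cons stock rest ih =>
    intro pts0 p
    show rest.foldl _ ((pts0 ++ [p]) ++ [nextPt (PySem.List.pyGetD (pts0 ++ [p]) (-1) []) stock]) = _
    rw [PySem.List.pyGetD_neg_one_append_singleton, ih]
    by_cases h : PySem.List.pyGetD stock 2 0 == 1 <;> simp [go_cons, h]

theorem classify (path : List (List Int)) : ∀ (p : List Int),
    ((path.zip ((p :: (go p path).1).zip (go p path).1)).filter
        (fun t => PySem.List.pyGetD t.1 2 0 == 1)).map (fun t => [t.2.1, t.2.2]) = (go p path).2.1
    ∧ ((path.zip ((p :: (go p path).1).zip (go p path).1)).filter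
        (fun t => !(PySem.List.pyGetD t.1 2 0 == 1))).map (fun t => [t.2.1, t.2.2]) = (go p path).2.2 := by
  induction path with
  | nil => intro p; simp [go]
  | cons stock rest ih =>
    intro p
    by_cases h : PySem.List.pyGetD stock 2 0 == 1 <;>
      simp only [go_cons, h, Bool.false_eq_true, if_true, if_false] <;>
      simpa [List.zip, List.filter, h] using ih (nextPt p stock)

theorem a_eq (path : List (List Int)) :
    stock2path path = ([0, 0, 0] :: (go [0, 0, 0] path).1, (go [0, 0, 0] path).2.1, (go [0, 0, 0] path).2.2) := by
  unfold stock2path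
  rw [show ([[(0:Int), 0, 0]] : List (List Int)) = [] ++ [[0, 0, 0]] from rfl, foldA]
  simp

theorem alt_eq (path : List (List Int)) :
    stock2path_alt path = ([0, 0, 0] :: (go [0, 0, 0] path).1, (go [0, 0, 0] path).2.1, (go [0, 0, 0] path).2.2) := by
  simp only [stock2path_alt]
  rw [show ([[(0:Int), 0, 0]] : List (List Int)) = [] ++ [[0, 0, 0]] from rfl, foldB]
  simp only [List.nil_append, PySem.List.slice_from_one]
  have h := classify path [0, 0, 0]
  exact Prod.ext rfl (Prod.ext h.1 h.2)

-- ===== VERDICT (by name: the statement is the Claim_ definition above) =====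
theorem stock2path_spec : Claim_equal_stock2path := by
  intro path _ _
  unfold Spec_stock2path
  rw [a_eq, alt_eq]
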